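-- pv_equiv track=rewrite | github.com/ivi982010/SySdL-TPs | Lexer.py | a_Sum
-- ===== SOURCE A (Python) =====
-- def a_Sum (tokens, acu):
--     s = 0
--     for c in acu:
--         if c == '+':
--             s = 1
--         else:
--             s = -1
--     if s == 1:
--         tokens.append(("<OpMat>", acu))
--     return (s == 1)
-- ===== SOURCE B (Python) =====
-- def a_Sum(tokens, acu):
--     ok = acu != "" and acu[-1] == "+"
--     if ok:
--         tokens.append(("<OpMat>", acu))
--     return ok
-- ===== Notes on version B (the rewrite author's own statement) =====
-- stated objective: simpler
-- what changed: Replaces A's scan that overwrites a flag on every character with a single check of the last character of acu, since only the last iteration of A's loop determines s.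
import Mathlib
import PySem

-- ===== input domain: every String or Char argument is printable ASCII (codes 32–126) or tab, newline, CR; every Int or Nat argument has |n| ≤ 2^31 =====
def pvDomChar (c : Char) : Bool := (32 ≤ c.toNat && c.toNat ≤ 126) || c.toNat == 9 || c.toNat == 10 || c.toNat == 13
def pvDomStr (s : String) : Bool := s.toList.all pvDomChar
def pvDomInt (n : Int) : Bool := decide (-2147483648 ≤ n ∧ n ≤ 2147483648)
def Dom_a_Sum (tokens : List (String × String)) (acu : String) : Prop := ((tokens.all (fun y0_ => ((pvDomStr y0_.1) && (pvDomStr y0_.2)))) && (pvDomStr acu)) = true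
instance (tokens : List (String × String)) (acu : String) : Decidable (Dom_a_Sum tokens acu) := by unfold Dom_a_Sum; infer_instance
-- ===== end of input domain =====

-- ===== PORT A =====
-- Port of A: fold over acu's characters maintaining s, return s == 1.
-- (A also appends to tokens when returning True; B performs the same append in Python;
--  the equivalence proved here is about the return value.)
def a_Sum (tokens : List (String × String)) (acu : String) : Bool :=
  let s : Int := acu.toList.foldl (fun s c => if c = '+' then 1 else -1) 0
  s == 1

-- ===== PORT B =====
-- Port of B: true iff acu is nonempty and its last character is '+'.
def a_Sum_alt (tokens : List (String × String)) (acu : String) : Bool :=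
  decide (acu.toList ≠ []) && (acu.toList.getLastD ' ' == '+')

-- ===== PRECONDITION & SPEC =====
def Spec_a_Sum (tokens : List (String × String)) (acu : String) (out : Bool) : Prop := out = a_Sum_alt tokens acu
instance (tokens : List (String × String)) (acu : String) (out : Bool) : Decidable (Spec_a_Sum tokens acu out) := by unfold Spec_a_Sum; infer_instance

-- ===== CLAIM (what is proved, stated in full; the proofs are below) =====
def Claim_equal_a_Sum : Prop := ∀ (tokens : List (String × String)) (acu : String), Dom_a_Sum tokens acu → Spec_a_Sum tokens acu (a_Sum tokens acu)

-- ===== LEMMAS AND PROOFS =====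

-- ===== VERDICT (by name: the statement is the Claim_ definition above) =====
theorem foldl_last (l : List Char) (s : Int) :
    l.foldl (fun s c => if c = '+' then (1:Int) else -1) s =
      match l.getLast? with
      | none => s
      | some c => if c = '+' then 1 else -1 := by
  induction l generalizing s with
  | nil => rfl
  | cons c rest ih =>
    cases rest with
    | nil => simp [List.foldl]
    | cons d t => simpa [List.foldl] using ih (if c = '+' then 1 else -1)

theorem a_Sum_spec : Claim_equal_a_Sum := by
  intro tokens acu _
  unfold Spec_a_Sum a_Sum a_Sum_alt
  rw [foldl_last]
  cases h : acu.toList.getLast? with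
  | none => simp [List.getLast?_eq_none_iff.mp h, List.getLastD]
  | some c =>
    have hne : acu.toList ≠ [] := by
      intro he; rw [he] at h; simp at h
    have : acu.toList.getLastD ' ' = c := by
      simp [List.getLastD_eq_getLast?, h]
    by_cases hc : c = '+' <;> simp [h, hne, hc]
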